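-- pv_equiv track=rewrite | github.com/unkper/YqyReinforcementLearningModule | rl_platform/tianshou_case/third_party/r_network_training.py | _split_history
-- ===== SOURCE A (Python) =====
-- def _split_history(observations, dones):
--     """Returns some individual trajectories."""
--     if len(observations) == 0:  # pylint: disable=g-explicit-length-test
--         return []
--
--     # Number of environments that generated "observations",
--     # and total number of steps.
--     nsteps = len(dones)
--
--     # Starting index of the current trajectory.
--     start_index = 0
--
--     trajectories = []
--     for k in range(nsteps):
--         if dones[k] or k == nsteps - 1:
--             next_start_index = k + 1
--             time_slice = observations[start_index:next_start_index]
--             trajectories.append([obs for obs in time_slice])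
--             start_index = next_start_index
--
--     return trajectories
-- ===== SOURCE B (Python) =====
-- def _split_history(observations, dones):
--     """Returns some individual trajectories."""
--     if len(observations) == 0:  # pylint: disable=g-explicit-length-test
--         return []
--     trajectories = []
--     current = []
--     for k, done in enumerate(dones):
--         if k < len(observations):
--             current.append(observations[k])
--         if done or k == len(dones) - 1:
--             trajectories.append(current)
--             current = []
--     return trajectories
-- ===== Notes on version B (the rewrite author's own statement) =====
-- stated objective: alternative
-- what changed: Replaces A's boundary detection with index-arithmetic slicing (start_index, observations[start:k+1]) by a single element-wise pass that accumulates each observation into a current-trajectory buffer and flushes the buffer at every done (or last) step; no slicing or start-index bookkeeping remains.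
import Mathlib
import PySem

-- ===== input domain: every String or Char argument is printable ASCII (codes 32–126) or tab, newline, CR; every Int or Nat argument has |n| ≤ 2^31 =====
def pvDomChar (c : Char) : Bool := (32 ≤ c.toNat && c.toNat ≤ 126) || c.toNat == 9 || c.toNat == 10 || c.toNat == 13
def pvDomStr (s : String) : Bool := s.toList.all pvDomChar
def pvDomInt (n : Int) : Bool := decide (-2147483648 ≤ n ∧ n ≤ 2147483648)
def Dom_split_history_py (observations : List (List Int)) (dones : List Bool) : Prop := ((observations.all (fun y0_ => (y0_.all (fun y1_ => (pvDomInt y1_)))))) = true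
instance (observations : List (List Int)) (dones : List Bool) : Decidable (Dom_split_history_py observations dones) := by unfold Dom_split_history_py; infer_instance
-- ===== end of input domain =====

-- B replaces A's index-arithmetic slicing at boundary steps by a single element-wise pass
-- that accumulates the current trajectory in a buffer and flushes it at each boundary (objective: simpler).

-- ===== PORT A =====
def split_history_py (observations : List (List Int)) (dones : List Bool) : List (List (List Int)) :=
  if PySem.List.len observations = 0 then []
  else
    let nsteps := PySem.List.len dones
    ((PySem.List.pyRange 0 nsteps 1).foldl
      (fun (s : Int × List (List (List Int))) k =>
        if PySem.List.pyGetD dones k false || k == nsteps - 1 then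
          let next_start_index := k + 1
          let time_slice := PySem.List.slice observations (some s.1) (some next_start_index)
          (next_start_index, s.2 ++ [time_slice.map (fun obs => obs)])
        else s)
      ((0 : Int), ([] : List (List (List Int))))).2

-- ===== PORT B =====
def split_history_py_alt (observations : List (List Int)) (dones : List Bool) : List (List (List Int)) :=
  if PySem.List.len observations = 0 then []
  else
    ((PySem.List.enumerate dones 0).foldl
      (fun (st : List (List Int) × List (List (List Int))) kd =>
        let current := if kd.1 < PySem.List.len observations
                       then st.1 ++ [PySem.List.pyGetD observations kd.1 []] else st.1
        if kd.2 || kd.1 == PySem.List.len dones - 1 then ([], st.2 ++ [current])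
        else (current, st.2))
      (([] : List (List Int)), ([] : List (List (List Int))))).2

-- ===== PRECONDITION & SPEC =====
def Spec_split_history_py (observations : List (List Int)) (dones : List Bool) (out : List (List (List Int))) : Prop := out = split_history_py_alt observations dones
instance (observations : List (List Int)) (dones : List Bool) (out : List (List (List Int))) : Decidable (Spec_split_history_py observations dones out) := by unfold Spec_split_history_py; infer_instance

-- ===== CLAIM (what is proved, stated in full; the proofs are below) =====
def Claim_equal_split_history_py : Prop := ∀ (observations : List (List Int)) (dones : List Bool), Dom_split_history_py observations dones → Spec_split_history_py observations dones (split_history_py observations dones)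

-- ===== LEMMAS AND PROOFS =====

-- Extending a slice by one step appends the element at j when it exists (Python slices clamp).
theorem slice_succ_append (obs : List (List Int)) (a j : Nat) (haj : a ≤ j) :
    PySem.List.slice obs (some ((a : Nat) : Int)) (some (((j : Nat) : Int) + 1)) =
    PySem.List.slice obs (some ((a : Nat) : Int)) (some ((j : Nat) : Int)) ++
      (if ((j : Nat) : Int) < (obs.length : Int) then [obs.getD j []] else []) := by
  have h1 : (((j : Nat) : Int) + 1) = (((j + 1 : Nat) : Nat) : Int) := by push_cast; ring
  rw [h1, PySem.List.slice_natCast, PySem.List.slice_natCast]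
  by_cases hj : j < obs.length
  · rw [if_pos (by exact_mod_cast hj)]
    have h2 : j + 1 - a = (j - a) + 1 := by omega
    rw [h2, List.take_add_one]
    congr 1
    have : (obs.drop a)[j - a]? = obs[j]? := by
      rw [List.getElem?_drop]; congr 1; omega
    rw [this, List.getElem?_eq_getElem hj]
    simp [List.getD, hj]
  · rw [if_neg (by exact_mod_cast hj)]
    rw [List.take_of_length_le (by simp; omega), List.take_of_length_le (by simp; omega)]
    simp

-- Main invariant: A's loop from index j with start a equals B's loop from index j with the
-- buffer holding obs[a:j].
theorem loop_eq (obs : List (List Int)) (dones : List Bool) :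
    ∀ (m j a : Nat) (acc : List (List (List Int))),
      dones.length - j ≤ m → a ≤ j →
      ((PySem.List.pyRange (j : Int) (PySem.List.len dones) 1).foldl
        (fun (s : Int × List (List (List Int))) k =>
          if PySem.List.pyGetD dones k false || k == PySem.List.len dones - 1 then
            (k + 1, s.2 ++ [(PySem.List.slice obs (some s.1) (some (k + 1))).map (fun o => o)])
          else s)
        (((a : Nat) : Int), acc)).2
      =
      ((PySem.List.enumerate (dones.drop j) (j : Int)).foldl
        (fun (st : List (List Int) × List (List (List Int))) kd =>
          let current := if kd.1 < PySem.List.len obs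
                         then st.1 ++ [PySem.List.pyGetD obs kd.1 []] else st.1
          if kd.2 || kd.1 == PySem.List.len dones - 1 then ([], st.2 ++ [current])
          else (current, st.2))
        (PySem.List.slice obs (some ((a : Nat) : Int)) (some ((j : Nat) : Int)), acc)).2 := by
  intro m
  induction m with
  | zero =>
      intro j a acc hm ha
      have hj : dones.length ≤ j := by omega
      rw [PySem.List.pyRange_one_eq_nil (by simp; exact_mod_cast hj),
          List.drop_of_length_le hj, PySem.List.enumerate_nil]
      rfl
  | succ m ih =>
      intro j a acc hm ha
      by_cases hj : j < dones.length
      · rw [PySem.List.pyRange_one_cons (by simp; exact_mod_cast hj),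
            List.drop_eq_getElem_cons hj, PySem.List.enumerate_cons]
        simp only [List.foldl_cons]
        have hget : PySem.List.pyGetD dones ((j : Nat) : Int) false = dones[j] := by
          simp [List.getD_eq_getElem?_getD, List.getElem?_eq_getElem hj]
        have hcur : (if ((j : Nat) : Int) < PySem.List.len obs
              then PySem.List.slice obs (some ((a : Nat) : Int)) (some ((j : Nat) : Int)) ++
                     [PySem.List.pyGetD obs ((j : Nat) : Int) []]
              else PySem.List.slice obs (some ((a : Nat) : Int)) (some ((j : Nat) : Int)))
            = PySem.List.slice obs (some ((a : Nat) : Int)) (some (((j : Nat) : Int) + 1)) := by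
          rw [slice_succ_append obs a j ha]
          by_cases hlt : ((j : Nat) : Int) < (obs.length : Int)
          · simp only [PySem.List.len_eq, if_pos hlt]
            congr 2
            simp [List.getD_eq_getElem?_getD]
          · simp only [PySem.List.len_eq, if_neg hlt]
            simp
        simp only [hget, hcur]
        have hc1 : (((j : Nat) : Int) + 1) = (((j + 1 : Nat) : Nat) : Int) := by push_cast; ring
        by_cases hc : (dones[j] || ((j : Nat) : Int) == PySem.List.len dones - 1) = true
        · simp only [if_pos hc]
          have hnil : PySem.List.slice obs (some (((j + 1 : Nat) : Nat) : Int)) (some (((j + 1 : Nat) : Nat) : Int)) = [] := by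
            rw [PySem.List.slice_natCast]; simp
          have hmap : (PySem.List.slice obs (some ((a : Nat) : Int)) (some (((j : Nat) : Int) + 1))).map (fun o : List Int => o)
              = PySem.List.slice obs (some ((a : Nat) : Int)) (some (((j : Nat) : Int) + 1)) := by simp
          have H := ih (j + 1) (j + 1)
            (acc ++ [PySem.List.slice obs (some ((a : Nat) : Int)) (some (((j : Nat) : Int) + 1))])
            (by omega) le_rfl
          rw [hnil] at H
          rw [hmap, hc1]
          exact H
        · simp only [if_neg hc]
          rw [hc1]
          exact ih (j + 1) a acc (by omega) (by omega)
      · have hj' : dones.length ≤ j := by omega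
        rw [PySem.List.pyRange_one_eq_nil (by simp; exact_mod_cast hj'),
            List.drop_of_length_le hj', PySem.List.enumerate_nil]
        rfl

theorem split_history_py_eq (observations : List (List Int)) (dones : List Bool) :
    split_history_py observations dones = split_history_py_alt observations dones := by
  unfold split_history_py split_history_py_alt
  by_cases h : PySem.List.len observations = 0
  · simp only [if_pos h]
  · simp only [if_neg h]
    have := loop_eq observations dones dones.length 0 0 [] (by omega) (le_refl 0)
    simpa using this

-- ===== VERDICT (by name: the statement is the Claim_ definition above) =====
theorem split_history_py_spec : Claim_equal_split_history_py := by
  intro observations dones _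
  unfold Spec_split_history_py
  exact split_history_py_eq observations dones
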